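-- pv_equiv track=rewrite | github.com/harrybhagat123456-dev/sbsa-best | modules/auto_topic_creator.py | build_parent_topic_tree
-- ===== SOURCE A (Python) =====
-- from collections import OrderedDict
--
-- def build_parent_topic_tree(topics: list) -> OrderedDict:
--     """
--     Group topics by their parent (part before the first '/').
--
--     e.g. ["Arithmetic", "English/Grammar", "English/Vocab", "English"]
--     →  OrderedDict({
--          "Arithmetic": ["Arithmetic"],
--          "English":    ["English/Grammar", "English/Vocab", "English"],
--        })
--
--     Each entry creates EXACTLY ONE forum topic (the parent).
--     All children are mapped to that same forum topic ID so the DRM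
--     handler routes their links into the correct thread.
--     """
--     tree: OrderedDict = OrderedDict()
--     for t in topics:
--         parent = t.split('/')[0].strip()
--         if parent not in tree:
--             tree[parent] = []
--         if t not in tree[parent]:
--             tree[parent].append(t)
--     return tree
-- ===== SOURCE B (Python) =====
-- from collections import OrderedDict
--
-- def build_parent_topic_tree(topics: list) -> OrderedDict:
--     # Staged passes instead of one incremental grouping loop:
--     # dedup the input, list the distinct parents in order, then build each
--     # group by filtering the deduped topics for that parent.
--     parent = lambda t: t.split('/')[0].strip()
--     uniq = list(dict.fromkeys(topics))
--     parents = list(dict.fromkeys(parent(t) for t in uniq))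
--     return OrderedDict((p, [t for t in uniq if parent(t) == p]) for p in parents)
-- ===== Notes on version B (the rewrite author's own statement) =====
-- stated objective: alternative
-- what changed: B replaces A's single incremental dict-building loop (create bucket on demand, per-parent membership scan before each append) with staged passes: dedup the whole input, compute the ordered list of distinct parents, then build each group by filtering the deduped topics for that parent.
import Mathlib
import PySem

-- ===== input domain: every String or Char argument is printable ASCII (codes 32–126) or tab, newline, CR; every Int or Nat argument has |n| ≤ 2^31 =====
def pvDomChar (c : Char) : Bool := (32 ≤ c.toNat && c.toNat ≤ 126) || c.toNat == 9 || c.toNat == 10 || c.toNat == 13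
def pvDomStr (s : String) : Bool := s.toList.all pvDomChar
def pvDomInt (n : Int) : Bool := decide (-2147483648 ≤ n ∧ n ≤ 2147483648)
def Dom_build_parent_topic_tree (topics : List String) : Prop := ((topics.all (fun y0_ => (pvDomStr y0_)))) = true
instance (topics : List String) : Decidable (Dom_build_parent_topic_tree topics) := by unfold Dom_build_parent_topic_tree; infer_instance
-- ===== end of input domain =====

-- B builds the tree in staged passes (dedup, distinct parents, one filter per parent)
-- instead of A's incremental dict-building loop; same return value (objective: alternative).

-- shared helper: t.split('/')[0].strip()  (identical expression in both Pythons)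
def pvParent (t : String) : String :=
  PySem.Str.strip (((PySem.Str.split? t "/").getD []).headD "")

-- ===== PORT A =====
def build_parent_topic_tree (topics : List String) : List (String × List String) :=
  (topics.foldl (fun tree t =>
      let parent := pvParent t
      let tree : PySem.Dict String (List String) :=
        if tree.contains parent then tree else tree.insert parent []
      if (tree.getD parent []).contains t then tree
      else tree.insert parent (tree.getD parent [] ++ [t]))
    PySem.Dict.empty).items

-- ===== PORT B =====
-- OrderedDict built from pairs with distinct keys: its items are exactly that pair list.
def build_parent_topic_tree_alt (topics : List String) : List (String × List String) :=
  let uniq := PySem.List.dedup topics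
  let parents := PySem.List.dedup (uniq.map pvParent)
  parents.map (fun p => (p, uniq.filter (fun t => pvParent t == p)))

-- ===== PRECONDITION & SPEC =====
def Spec_build_parent_topic_tree (topics : List String) (out : List (String × List String)) : Prop := out = build_parent_topic_tree_alt topics
instance (topics : List String) (out : List (String × List String)) : Decidable (Spec_build_parent_topic_tree topics out) := by unfold Spec_build_parent_topic_tree; infer_instance

-- ===== CLAIM (what is proved, stated in full; the proofs are below) =====
def Claim_equal_build_parent_topic_tree : Prop := ∀ (topics : List String), Dom_build_parent_topic_tree topics → Spec_build_parent_topic_tree topics (build_parent_topic_tree topics)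

-- ===== LEMMAS AND PROOFS =====

def pvStepA (tree : PySem.Dict String (List String)) (t : String) :
    PySem.Dict String (List String) :=
  let parent := pvParent t
  let tree : PySem.Dict String (List String) :=
    if tree.contains parent then tree else tree.insert parent []
  if (tree.getD parent []).contains t then tree
  else tree.insert parent (tree.getD parent [] ++ [t])

-- intermediate step: append t to its parent's bucket (creating it if needed)
def pvStepB (tree : PySem.Dict String (List String)) (t : String) :
    PySem.Dict String (List String) :=
  tree.modify (pvParent t) [] (· ++ [t])

-- ordered dedup of `rest` relative to the already-seen elements `seen`
def pvDedupFrom (seen : List String) : List String → List String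
  | [] => []
  | t :: rest =>
      if t ∈ seen then pvDedupFrom seen rest
      else t :: pvDedupFrom (seen ++ [t]) rest

lemma pvFoldlAdd (rest : List String) (seen : List String) :
    rest.foldl PySem.Set.add seen = seen ++ pvDedupFrom seen rest := by
  induction rest generalizing seen with
  | nil => simp [pvDedupFrom]
  | cons t rest ih =>
    simp only [List.foldl_cons, pvDedupFrom, PySem.Set.add, PySem.Set.contains]
    by_cases h : t ∈ seen
    · simp [h, ih]
    · simp [h, ih]

lemma pvDedup_eq (topics : List String) :
    PySem.List.dedup topics = pvDedupFrom [] topics := by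
  have h1 : PySem.List.dedup topics = topics.foldl PySem.Set.add [] := by
    rw [PySem.List.dedup_eq_ofList, PySem.Set.ofList_eq_foldl]
  rw [h1, pvFoldlAdd]; simp

lemma pvContains_of_getD_ne_nil (d : PySem.Dict String (List String)) (k : String)
    (h : d.getD k [] ≠ []) : d.contains k = true := by
  cases hc : d.contains k
  · exfalso
    have hnone : d.get? k = none :=
      (PySem.Dict.get?_eq_none_iff_contains d k).mpr hc
    exact h (by simp [PySem.Dict.getD, hnone])
  · rfl

-- A's step on a fresh element is exactly the modify step
lemma pvStepA_fresh (d : PySem.Dict String (List String)) (t : String)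
    (hmem : t ∉ d.getD (pvParent t) []) : pvStepA d t = pvStepB d t := by
  simp only [pvStepA, pvStepB, PySem.Dict.modify]
  cases hc : d.contains (pvParent t) with
  | true =>
    simp only [if_true]
    rw [if_neg (by simpa using hmem)]
  | false =>
    have h0 : d.getD (pvParent t) [] = [] :=
      PySem.Dict.getD_of_not_contains d [] hc
    simp [PySem.Dict.getD_insert_self, PySem.Dict.insert_insert_self, h0]

lemma pvMain (rest : List String) (d : PySem.Dict String (List String))
    (seen : List String)
    (hinv : ∀ u : String, u ∈ d.getD (pvParent u) [] ↔ u ∈ seen) :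
    rest.foldl pvStepA d = (pvDedupFrom seen rest).foldl pvStepB d := by
  induction rest generalizing d seen with
  | nil => simp [pvDedupFrom]
  | cons t rest ih =>
    simp only [List.foldl_cons, pvDedupFrom]
    by_cases hseen : t ∈ seen
    · have hmem : t ∈ d.getD (pvParent t) [] := (hinv t).mpr hseen
      have hcont : d.contains (pvParent t) = true :=
        pvContains_of_getD_ne_nil d (pvParent t)
          (by intro h; rw [h] at hmem; simp at hmem)
      have hstep : pvStepA d t = d := by
        simp [pvStepA, hcont, hmem]
      rw [if_pos hseen, hstep]
      exact ih d seen hinv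
    · have hmem : t ∉ d.getD (pvParent t) [] := fun h => hseen ((hinv t).mp h)
      rw [if_neg hseen]
      simp only [List.foldl_cons]
      rw [pvStepA_fresh d t hmem]
      apply ih
      intro u
      by_cases hp : pvParent u = pvParent t
      · have hgu : (pvStepB d t).getD (pvParent u) []
            = d.getD (pvParent t) [] ++ [t] := by
          rw [hp]; exact PySem.Dict.getD_modify_self d (pvParent t) [] _
        rw [hgu]
        have hiu := hinv u
        rw [hp] at hiu
        simp [List.mem_append, hiu]
      · have hut : u ≠ t := fun h => hp (h ▸ rfl)
        have hgu : (pvStepB d t).getD (pvParent u) [] = d.getD (pvParent u) [] := by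
          exact PySem.Dict.getD_modify_of_ne d [] _ hp
        rw [hgu, hinv u]
        simp [hut]

-- ===== VERDICT (by name: the statement is the Claim_ definition above) =====
theorem build_parent_topic_tree_spec : Claim_equal_build_parent_topic_tree := by
  intro topics _
  show (topics.foldl pvStepA PySem.Dict.empty).items = _
  rw [pvMain topics PySem.Dict.empty []
      (by intro u; simp [PySem.Dict.getD, PySem.Dict.get?, PySem.Dict.empty]),
    ← pvDedup_eq]
  -- items of the modify fold over the deduped list = B's staged construction
  set uniq := PySem.List.dedup topics with huniq
  have hfold : uniq.foldl pvStepB PySem.Dict.empty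
      = (uniq.map (fun t => (pvParent t, t))).foldl
          (fun d p => d.modify p.1 [] (· ++ [p.2])) PySem.Dict.empty := by
    rw [List.foldl_map]; rfl
  have hkeys : (uniq.foldl pvStepB PySem.Dict.empty).keys
      = PySem.List.dedup (uniq.map pvParent) := by
    rw [show pvStepB = (fun d t => PySem.Dict.modify d (pvParent t) [] (· ++ [t])) from rfl,
      PySem.Dict.keys_foldl_modify_key]
    rw [PySem.Dict.keys_empty, PySem.Set.update_eq_append_filter]
    simp [PySem.Set.contains, PySem.List.dedup_eq_ofList]
  have hnd : (uniq.foldl pvStepB PySem.Dict.empty).keys.Nodup := by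
    exact PySem.Dict.nodup_keys_foldl_modify_key uniq pvParent [] (fun d t => (· ++ [t]))
      PySem.Dict.empty (by simp [PySem.Dict.keys_empty])
  rw [PySem.Dict.items_eq_map_keys _ hnd ([] : List String), hkeys]
  unfold build_parent_topic_tree_alt
  apply List.map_congr_left
  intro p hp
  congr 1
  rw [hfold, PySem.Dict.getD_foldl_modify_append]
  simp [List.filter_map, Function.comp_def, List.map_map, huniq]
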